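-- pv_equiv track=rewrite | github.com/kushan-abeysekara/trd_bot | backend/services/market_analyzer.py | _find_consecutive_patterns
-- ===== SOURCE A (Python) =====
-- from typing import Dict, List, Optional, Tuple
--
-- def _find_consecutive_patterns(digits: List[int], min_length: int = 3) -> List[str]:
--     """Find consecutive patterns like '123', '456'"""
--     patterns = []
--     digit_str = ''.join(map(str, digits))
--     for length in range(min_length, len(digits)):
--         for start in range(len(digits) - length):
--             seq = digit_str[start:start+length]
--             if all(int(seq[i]) + 1 == int(seq[i+1]) for i in range(len(seq) - 1)) and seq not in patterns:
--                 patterns.append(seq)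
--
--     return patterns
-- ===== SOURCE B (Python) =====
-- def _find_consecutive_patterns(digits, min_length=3):
--     s = ''.join(map(str, digits))
--     n = len(digits)
--     # run[i] = length of the longest run of increasing consecutive digits starting at s[i],
--     # computed in one right-to-left pass
--     run = []
--     nxt = None
--     cur = 0
--     for c in reversed(s):
--         cur = cur + 1 if nxt is not None and ord(c) + 1 == ord(nxt) else 1
--         run.append(cur)
--         nxt = c
--     run.reverse()
--     maxrun = max(run, default=0)
--     patterns = []
--     seen = set()
--     for length in range(min_length, n):
--         if length > maxrun:
--             continue
--         for start in range(n - length):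
--             if run[start] >= length:
--                 seq = s[start:start + length]
--                 if seq not in seen:
--                     seen.add(seq)
--                     patterns.append(seq)
--     return patterns
-- ===== Notes on version B (the rewrite author's own statement) =====
-- stated objective: faster
-- what changed: B precomputes, in one right-to-left pass, the maximal increasing-consecutive run length starting at each position of the joined digit string, so each window is validated by one O(1) table lookup and deduplicated via a set (window lengths longer than the longest run are skipped outright), instead of A's per-window all()-scan and O(k) list membership test; …
-- outside the precondition, e.g. on _find_consecutive_patterns([3, 1, -5], 2): A returns [], B returns []; on _find_consecutive_patterns([1], -1): A returns [''], B raises IndexError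
import Mathlib
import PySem

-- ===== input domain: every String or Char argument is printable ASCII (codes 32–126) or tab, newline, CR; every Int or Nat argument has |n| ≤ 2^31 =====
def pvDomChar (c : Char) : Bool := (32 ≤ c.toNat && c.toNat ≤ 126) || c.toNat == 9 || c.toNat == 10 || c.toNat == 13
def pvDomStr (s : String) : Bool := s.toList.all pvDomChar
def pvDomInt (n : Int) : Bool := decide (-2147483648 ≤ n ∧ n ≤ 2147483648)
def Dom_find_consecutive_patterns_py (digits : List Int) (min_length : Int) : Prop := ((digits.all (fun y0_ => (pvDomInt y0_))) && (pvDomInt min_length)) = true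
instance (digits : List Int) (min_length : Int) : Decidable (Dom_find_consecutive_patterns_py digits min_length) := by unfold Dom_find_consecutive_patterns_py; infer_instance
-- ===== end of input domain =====

-- B replaces A's per-window all()-scan and list membership dedup by a precomputed table of
-- maximal consecutive-run lengths over the joined digit string (one right-to-left pass), an
-- O(1) validity lookup per window, a set for dedup, and an outright skip of window lengths
-- longer than the longest run (measured faster in a timing run).


-- ===== PORT A =====
-- int(ch) for a one-character string; Pre_ guarantees every character reached is a digit
-- (on a non-digit Python raises ValueError; the .getD 0 default is never reached inside Pre_).
def pvIntChar (c : Char) : Int := (PySem.Int.ofStr? (String.ofList [c])).getD 0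

-- literal port of A (strings handled as char lists per the PySem convention; built back at the end)
def find_consecutive_patterns_py (digits : List Int) (min_length : Int) : List String :=
  let digit_str : List Char := PySem.Chars.join [] (digits.map (fun d => (PySem.Int.toStr d).toList))
  let patterns : List (List Char) :=
    (PySem.List.pyRange min_length (digits.length : Int) 1).foldl (fun patterns length =>
      (PySem.List.pyRange 0 ((digits.length : Int) - length) 1).foldl (fun patterns start =>
        let seq : List Char := PySem.List.slice digit_str (some start) (some (start + length))
        if ((List.range (seq.length - 1)).all fun i =>
              pvIntChar (seq.getD i ' ') + 1 == pvIntChar (seq.getD (i + 1) ' ')) &&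
           !(patterns.contains seq)
        then patterns ++ [seq] else patterns) patterns) []
  patterns.map String.ofList

-- ===== PORT B =====
-- one step of B's right-to-left run-length loop: state (run list so far, nxt char, current run)
def pvRunStep (st : List Int × Option Char × Int) (c : Char) : List Int × Option Char × Int :=
  let cur : Int :=
    match st.2.1 with
    | some p => if (c.toNat : Int) + 1 == (p.toNat : Int) then st.2.2 + 1 else 1
    | none => 1
  (st.1 ++ [cur], some c, cur)

-- literal port of B (Source B)
def find_consecutive_patterns_py_alt (digits : List Int) (min_length : Int) : List String :=
  let s : List Char := PySem.Chars.join [] (digits.map (fun d => (PySem.Int.toStr d).toList))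
  let n : Int := (digits.length : Int)
  let st : List Int × Option Char × Int := s.reverse.foldl pvRunStep ([], none, 0)
  let run : List Int := st.1.reverse
  let maxrun : Int := PySem.List.maxD run (fun x => x) 0
  let acc : List (List Char) × PySem.Set (List Char) :=
    (PySem.List.pyRange min_length n 1).foldl (fun acc length =>
      if maxrun < length then acc else
      (PySem.List.pyRange 0 (n - length) 1).foldl (fun acc start =>
        -- run[start]: the index is in range under Pre_ (0 ≤ start < n - length and 1 ≤ length, so start < n ≤ len s)
        if PySem.List.pyGetD run start 0 ≥ length then
          let seq : List Char := PySem.List.slice s (some start) (some (start + length))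
          if !(PySem.Set.contains acc.2 seq) then (acc.1 ++ [seq], PySem.Set.add acc.2 seq)
          else acc
        else acc) acc) ([], PySem.Set.empty)
  acc.1.map String.ofList

-- ===== PRECONDITION & SPEC =====
-- Pre_ excludes min_length < 0, where A's negative window lengths produce negative-stop
-- slice-wraparound values that are accidents of Python slicing and B's run-table lookup raises
-- IndexError on some such inputs; and it excludes lists mixing a negative int with enough other
-- entries that a window scan can reach a '-' sign, where A's int() raises ValueError on most
-- inputs (lists of ≤ 2 ints, lists with min_length ≥ len(digits), and all-nonnegative lists
-- stay inside: there no int() ever sees a '-').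
def Pre_find_consecutive_patterns_py (digits : List Int) (min_length : Int) : Prop :=
  0 ≤ min_length ∧
    ((∀ d ∈ digits, 0 ≤ d) ∨ digits.length ≤ 2 ∨ (digits.length : Int) ≤ min_length)
instance (digits : List Int) (min_length : Int) : Decidable (Pre_find_consecutive_patterns_py digits min_length) := by unfold Pre_find_consecutive_patterns_py; infer_instance

def pvWitness_find_consecutive_patterns_py : List Int × Int := ([1, 2, 3, 7], 2)

def Spec_find_consecutive_patterns_py (digits : List Int) (min_length : Int) (out : List String) : Prop := out = find_consecutive_patterns_py_alt digits min_length
instance (digits : List Int) (min_length : Int) (out : List String) : Decidable (Spec_find_consecutive_patterns_py digits min_length out) := by unfold Spec_find_consecutive_patterns_py; infer_instance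

-- ===== CLAIM (what is proved, stated in full; the proofs are below) =====
def Claim_equal_find_consecutive_patterns_py : Prop := ∀ (digits : List Int) (min_length : Int), Dom_find_consecutive_patterns_py digits min_length → Pre_find_consecutive_patterns_py digits min_length → Spec_find_consecutive_patterns_py digits min_length (find_consecutive_patterns_py digits min_length)

-- ===== LEMMAS AND PROOFS =====

def pvChain : List Char → Bool
  | c :: d :: t => (pvIntChar c + 1 == pvIntChar d) && pvChain (d :: t)
  | _ => true
def pvRun : List Char → List Int
  | [] => []
  | [_] => [1]
  | c :: d :: t => (if pvIntChar c + 1 == pvIntChar d then (pvRun (d :: t)).headD 0 + 1 else 1) :: pvRun (d :: t)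

theorem pvRun_length (s : List Char) : (pvRun s).length = s.length := by
  match s with
  | [] => rfl
  | [_] => rfl
  | c :: d :: t => simp [pvRun, pvRun_length (d :: t)]

theorem pvRun_headD_pos (s : List Char) (h : s ≠ []) : 1 ≤ (pvRun s).headD 0 := by
  match s with
  | [_] => simp [pvRun]
  | c :: d :: t =>
    simp only [pvRun, List.headD_cons]
    split
    · have := pvRun_headD_pos (d :: t) (by simp)
      omega
    · omega

theorem pvChain_eq_all (l : List Char) :
    ((List.range (l.length - 1)).all fun i =>
      pvIntChar (l.getD i ' ') + 1 == pvIntChar (l.getD (i + 1) ' ')) = pvChain l := by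
  match l with
  | [] => rfl
  | [_] => rfl
  | c :: d :: t =>
    have ih := pvChain_eq_all (d :: t)
    simp only [List.length_cons, Nat.add_sub_cancel] at ih ⊢
    rw [List.range_succ_eq_map]
    simp only [List.all_cons, List.all_map]
    rw [pvChain, ← ih]
    rfl

theorem pvRunStep_some (l : List Int) (p : Char) (cur0 : Int) (c : Char) :
    pvRunStep (l, some p, cur0) c =
      (l ++ [if (c.toNat : Int) + 1 == (p.toNat : Int) then cur0 + 1 else 1], some c,
       if (c.toNat : Int) + 1 == (p.toNat : Int) then cur0 + 1 else 1) := rfl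

-- ord-based run table: what B's loop computes (agrees with pvRun on digit characters)
def pvRunO : List Char → List Int
  | [] => []
  | [_] => [1]
  | c :: d :: t => (if (c.toNat : Int) + 1 == (d.toNat : Int) then (pvRunO (d :: t)).headD 0 + 1 else 1) :: pvRunO (d :: t)

theorem pvRunO_fold (s : List Char) :
    s.reverse.foldl pvRunStep ([], none, 0) = ((pvRunO s).reverse, s.head?, (pvRunO s).headD 0) := by
  match s with
  | [] => rfl
  | c :: t =>
    have ih := pvRunO_fold t
    rw [List.reverse_cons, List.foldl_append, ih]
    match t with
    | [] => rfl
    | d :: t' =>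
      rw [List.foldl_cons, List.foldl_nil]
      simp only [List.head?_cons]
      rw [pvRunStep_some]
      simp only [pvRunO, List.headD_cons]
      split
      · simp
      · simp

theorem pvChain_take_iff (s : List Char) (k : Nat) (hk : 1 ≤ k) (hle : k ≤ s.length) :
    (pvChain (s.take k) = true) ↔ ((k : Int) ≤ (pvRun s).headD 0) := by
  match s, k with
  | [], k => simp at hle; omega
  | c :: t, 0 => omega
  | [c], (k' + 2) => simp at hle
  | c :: t, 1 =>
    have h1 := pvRun_headD_pos (c :: t) (by simp)
    simp only [List.take_succ_cons, List.take_zero]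
    constructor
    · intro _; exact_mod_cast h1
    · intro _; rfl
  | c :: d :: t, (k' + 2) =>
    have ih := pvChain_take_iff (d :: t) (k' + 1) (by omega) (by simp only [List.length_cons] at hle ⊢; omega)
    simp only [List.take_succ_cons] at ih ⊢
    rw [show pvChain (c :: d :: List.take k' t) = ((pvIntChar c + 1 == pvIntChar d) && pvChain (d :: List.take k' t)) from rfl]
    simp only [pvRun, List.headD_cons]
    constructor
    · intro h
      rw [Bool.and_eq_true, beq_iff_eq] at h
      rw [if_pos (by rw [beq_iff_eq]; exact h.1)]
      have := ih.mp h.2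
      push_cast at this ⊢
      omega
    · intro h
      split at h
      · rename_i hcd
        rw [Bool.and_eq_true]
        refine ⟨hcd, ih.mpr ?_⟩
        push_cast at h ⊢
        omega
      · exfalso; push_cast at h; omega

theorem pvChain_drop_take_iff (s : List Char) (a k : Nat) (hk : 1 ≤ k) (hle : a + k ≤ s.length) :
    (pvChain ((s.drop a).take k) = true) ↔ ((k : Int) ≤ (pvRun s).getD a 0) := by
  match s, a with
  | [], (a' + 1) => simp at hle
  | s, 0 =>
    rw [List.drop_zero, show (pvRun s).getD 0 0 = (pvRun s).headD 0 from by
      cases pvRun s <;> simp [List.getD]]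
    exact pvChain_take_iff s k hk (by omega)
  | c :: t, (a' + 1) =>
    have hlen : (pvRun (c :: t)).length = (c :: t).length := pvRun_length _
    have ht : t ≠ [] := by
      intro h; subst h; simp at hle; omega
    have ih := pvChain_drop_take_iff t a' k hk (by simp only [List.length_cons] at hle; omega)
    rw [List.drop_succ_cons]
    rw [show pvRun (c :: t) = (match t with
      | [] => [1]
      | d :: t' => (if pvIntChar c + 1 == pvIntChar d then (pvRun (d :: t')).headD 0 + 1 else 1) :: pvRun (d :: t')) from ?_]
    · match t, ht with
      | d :: t', _ =>
        rw [show ((if pvIntChar c + 1 == pvIntChar d then (pvRun (d :: t')).headD 0 + 1 else 1) :: pvRun (d :: t')).getD (a' + 1) 0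
            = (pvRun (d :: t')).getD a' 0 from by simp [List.getD]]
        exact ih
    · match t, ht with
      | d :: t', _ => rfl

-- ===== digit-character facts: under Pre_ every character of the joined string is '0'..'9' =====
theorem pvFlattenIntersperse (l : List (List Char)) :
    (List.intersperse ([] : List Char) l).flatten = l.flatten := by
  induction l with
  | nil => rfl
  | cons x xs ih =>
    cases xs with
    | nil => rfl
    | cons y ys =>
      simp only [List.intersperse_cons₂, List.flatten_cons] at *
      simp [ih]

theorem pvIntChar_digit (c : Char) (h1 : 48 ≤ c.toNat) (h2 : c.toNat ≤ 57) :
    pvIntChar c = (c.toNat : Int) - 48 := by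
  have hv : c = Char.ofNat c.toNat := by
    apply Char.ext
    rw [Char.ofNat, dif_pos (Or.inl (by omega))]
    rfl
  set n := c.toNat with hn
  rw [pvIntChar, hv]
  interval_cases n <;> decide

theorem pvDigitCharBound (n : Nat) (h : n < 10) :
    48 ≤ (Nat.digitChar n).toNat ∧ (Nat.digitChar n).toNat ≤ 57 := by
  interval_cases n <;> decide

theorem pvToDigitsCoreBound (f : Nat) : ∀ (n : Nat) (l : List Char),
    (∀ c ∈ l, 48 ≤ c.toNat ∧ c.toNat ≤ 57) →
    ∀ c ∈ Nat.toDigitsCore 10 f n l, 48 ≤ c.toNat ∧ c.toNat ≤ 57 := by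
  induction f with
  | zero => intro n l hl; simpa [Nat.toDigitsCore] using hl
  | succ f ih =>
    intro n l hl c hc
    simp only [Nat.toDigitsCore] at hc
    by_cases h0 : n / 10 = 0
    · rw [if_pos h0] at hc
      rcases List.mem_cons.mp hc with h | h
      · subst h; exact pvDigitCharBound _ (Nat.mod_lt _ (by omega))
      · exact hl c h
    · rw [if_neg h0] at hc
      refine ih (n / 10) ((n % 10).digitChar :: l) ?_ c hc
      intro c' hc'
      rcases List.mem_cons.mp hc' with h | h
      · subst h; exact pvDigitCharBound _ (Nat.mod_lt _ (by omega))
      · exact hl c' h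

theorem pvJoinDigits (digits : List Int) (h : ∀ d ∈ digits, 0 ≤ d) :
    ∀ c ∈ PySem.Chars.join [] (digits.map fun d => (PySem.Int.toStr d).toList),
      48 ≤ c.toNat ∧ c.toNat ≤ 57 := by
  intro c hc
  rw [PySem.Chars.join, List.intercalate, pvFlattenIntersperse] at hc
  rcases List.mem_flatten.mp hc with ⟨l, hl, hcl⟩
  rcases List.mem_map.mp hl with ⟨d, hd, rfl⟩
  rw [PySem.Int.toList_toStr, PySem.Int.toChars, if_neg (by have := h d hd; omega),
      Nat.toDigits] at hcl
  exact pvToDigitsCoreBound _ _ [] (by simp) c hcl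

theorem pvToDigitsCoreLen (f : Nat) : ∀ (n : Nat) (l : List Char), 1 ≤ f →
    l.length + 1 ≤ (Nat.toDigitsCore 10 f n l).length := by
  induction f with
  | zero => intro n l h; omega
  | succ f ih =>
    intro n l _
    simp only [Nat.toDigitsCore]
    by_cases h0 : n / 10 = 0
    · rw [if_pos h0]; simp
    · rw [if_neg h0]
      cases f with
      | zero => simp [Nat.toDigitsCore]
      | succ f' =>
        have := ih (n / 10) ((n % 10).digitChar :: l) (by omega)
        simp only [List.length_cons] at this
        omega

theorem pvJoinLen (digits : List Int) :
    digits.length ≤ (PySem.Chars.join [] (digits.map fun d => (PySem.Int.toStr d).toList)).length := by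
  rw [PySem.Chars.join, List.intercalate, pvFlattenIntersperse]
  induction digits with
  | nil => simp
  | cons d t ih =>
    simp only [List.map_cons, List.flatten_cons, List.length_append, List.length_cons]
    have h1 : 1 ≤ (PySem.Int.toStr d).toList.length := by
      rw [PySem.Int.toList_toStr, PySem.Int.toChars]
      split
      · simp
      · simpa using pvToDigitsCoreLen _ _ [] (by omega)
    omega

theorem pvRunO_eq_pvRun (s : List Char) (h : ∀ c ∈ s, 48 ≤ c.toNat ∧ c.toNat ≤ 57) :
    pvRunO s = pvRun s := by
  match s with
  | [] => rfl
  | [c] => rfl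
  | c :: d :: t =>
    have ih := pvRunO_eq_pvRun (d :: t) (fun x hx => h x (List.mem_cons_of_mem _ hx))
    have hc := h c (by simp)
    have hd := h d (by simp)
    have hcmp : ((c.toNat : Int) + 1 == (d.toNat : Int)) = (pvIntChar c + 1 == pvIntChar d) := by
      rw [Bool.eq_iff_iff, beq_iff_eq, beq_iff_eq,
          pvIntChar_digit c hc.1 hc.2, pvIntChar_digit d hd.1 hd.2]
      omega
    simp only [pvRunO, pvRun, ih, hcmp]

-- the relation the two loops preserve: B's list equals A's, B's set has A's members
def pvRel (a : List (List Char)) (b : List (List Char) × PySem.Set (List Char)) : Prop :=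
  b.1 = a ∧ ∀ x, PySem.Set.contains b.2 x = a.contains x

-- a fold in each program, in lockstep
theorem pvFoldRel {α β γ : Type} (f : α → γ → α) (g : β → γ → β) (R : α → β → Prop)
    (l : List γ) (hstep : ∀ a b c, c ∈ l → R a b → R (f a c) (g b c)) :
    ∀ a b, R a b → R (l.foldl f a) (l.foldl g b) := by
  induction l with
  | nil => intro a b h; exact h
  | cons x t ih =>
    intro a b h
    exact ih (fun a b c hc => hstep a b c (List.mem_cons_of_mem _ hc)) _ _
      (hstep a b x (by simp) h)

-- A's chain-scan of a window equals B's O(1) run-table test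
theorem pvChainAll_eq (s : List Char) (length start : Int)
    (h1 : 1 ≤ length) (hs0 : 0 ≤ start) (hsl : start + length ≤ (s.length : Int)) :
    ((List.range ((PySem.List.slice s (some start) (some (start + length))).length - 1)).all fun i =>
        pvIntChar ((PySem.List.slice s (some start) (some (start + length))).getD i ' ') + 1 ==
          pvIntChar ((PySem.List.slice s (some start) (some (start + length))).getD (i + 1) ' '))
      = decide (length ≤ PySem.List.pyGetD (pvRun s) start 0) := by
  have haC : PySem.List.clampIdx s.length start = start.toNat := by
    simp only [PySem.List.clampIdx]; split_ifs <;> omega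
  have hbC : PySem.List.clampIdx s.length (start + length) = (start + length).toNat := by
    simp only [PySem.List.clampIdx]; split_ifs <;> omega
  have hk : (start + length).toNat - start.toNat = length.toNat := by omega
  have hslice : PySem.List.slice s (some start) (some (start + length))
      = (s.drop start.toNat).take length.toNat := by
    simp only [PySem.List.slice, haC, hbC, hk]
  have hchain := pvChain_drop_take_iff s start.toNat length.toNat (by omega) (by omega)
  have hget : PySem.List.pyGetD (pvRun s) start 0 = (pvRun s).getD start.toNat 0 := by
    simp [PySem.List.pyGetD_of_nonneg, hs0]
  have hcast : ((length.toNat : Nat) : Int) = length := by omega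
  rw [hslice, pvChain_eq_all, hget]
  by_cases hc : length ≤ (pvRun s).getD start.toNat 0
  · rw [hchain.mpr (by omega), decide_eq_true hc]
  · rw [decide_eq_false hc, ← Bool.not_eq_true]
    intro habs
    exact hc (by have := hchain.mp habs; omega)


theorem pvRun_pos (s : List Char) : ∀ x ∈ pvRun s, 1 ≤ x := by
  match s with
  | [] => simp [pvRun]
  | [c] => simp [pvRun]
  | c :: d :: t =>
    have ih := pvRun_pos (d :: t)
    intro x hx
    simp only [pvRun] at hx
    rcases List.mem_cons.mp hx with rfl | h
    · split
      · have hne : pvRun (d :: t) ≠ [] := by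
          intro hh
          have := pvRun_length (d :: t)
          rw [hh] at this
          simp at this
        obtain ⟨y, t', hy⟩ : ∃ y t', pvRun (d :: t) = y :: t' := by
          cases hz : pvRun (d :: t) with
          | nil => exact absurd hz hne
          | cons y t' => exact ⟨y, t', rfl⟩
        have := ih y (by rw [hy]; simp)
        rw [hy]
        simp only [List.headD_cons]
        omega
      · omega
    · exact ih x h

theorem pvRunO_length (s : List Char) : (pvRunO s).length = s.length := by
  match s with
  | [] => rfl
  | [_] => rfl
  | c :: d :: t => simp [pvRunO, pvRunO_length (d :: t)]

theorem pvRunO_pos (s : List Char) : ∀ x ∈ pvRunO s, 1 ≤ x := by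
  match s with
  | [] => simp [pvRunO]
  | [c] => simp [pvRunO]
  | c :: d :: t =>
    have ih := pvRunO_pos (d :: t)
    intro x hx
    simp only [pvRunO] at hx
    rcases List.mem_cons.mp hx with rfl | h
    · split
      · have hne : pvRunO (d :: t) ≠ [] := by
          intro hh
          have := pvRunO_length (d :: t)
          rw [hh] at this
          simp at this
        obtain ⟨y, t', hy⟩ : ∃ y t', pvRunO (d :: t) = y :: t' := by
          cases hz : pvRunO (d :: t) with
          | nil => exact absurd hz hne
          | cons y t' => exact ⟨y, t', rfl⟩
        have := ih y (by rw [hy]; simp)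
        rw [hy]
        simp only [List.headD_cons]
        omega
      · omega
    · exact ih x h

-- windows of length 0 or 1 have no comparison: A's all()-scan is vacuously true
theorem pvChainAll_small (s : List Char) (length start : Int)
    (h0 : 0 ≤ length) (h1 : length ≤ 1) (hs0 : 0 ≤ start) (hsl : start + length ≤ (s.length : Int)) :
    ((List.range ((PySem.List.slice s (some start) (some (start + length))).length - 1)).all fun i =>
        pvIntChar ((PySem.List.slice s (some start) (some (start + length))).getD i ' ') + 1 ==
          pvIntChar ((PySem.List.slice s (some start) (some (start + length))).getD (i + 1) ' '))
      = true := by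
  have haC : PySem.List.clampIdx s.length start = start.toNat := by
    simp only [PySem.List.clampIdx]; split_ifs <;> omega
  have hbC : PySem.List.clampIdx s.length (start + length) = (start + length).toNat := by
    simp only [PySem.List.clampIdx]; split_ifs <;> omega
  have hk : (start + length).toNat - start.toNat = length.toNat := by omega
  have hslice : PySem.List.slice s (some start) (some (start + length))
      = (s.drop start.toNat).take length.toNat := by
    simp only [PySem.List.slice, haC, hbC, hk]
  have hlen : (PySem.List.slice s (some start) (some (start + length))).length ≤ 1 := by
    rw [hslice]
    have := List.length_take_le length.toNat (s.drop start.toNat)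
    omega
  have hzero : (PySem.List.slice s (some start) (some (start + length))).length - 1 = 0 := by omega
  rw [hzero, List.range_zero, List.all_nil]

-- and B's run-table test passes on them (every run length is ≥ 1)
theorem pvGuard_small (r : List Int) (start length : Int)
    (hpos : ∀ x ∈ r, 1 ≤ x) (hs0 : 0 ≤ start) (hlt : start < (r.length : Int)) (h1 : length ≤ 1) :
    length ≤ PySem.List.pyGetD r start 0 := by
  have hget : PySem.List.pyGetD r start 0 = r.getD start.toNat 0 := by
    simp [PySem.List.pyGetD_of_nonneg, hs0]
  have hltn : start.toNat < r.length := by omega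
  have hmem : r.getD start.toNat 0 ∈ r := by
    rw [List.getD_eq_getElem _ _ hltn]
    exact List.getElem_mem hltn
  have := hpos _ hmem
  omega

theorem pvLe_maxD (r : List Int) (x : Int) (hx : x ∈ r) :
    x ≤ PySem.List.maxD r (fun y => y) 0 := by
  rcases hmx : PySem.List.max? r (fun y => y) with _ | m
  · rw [PySem.List.max?_eq_none_iff] at hmx
    subst hmx
    cases hx
  · have := PySem.List.max?_isMax hmx x hx
    simpa [PySem.List.maxD, hmx] using this

theorem pvMaxD_nonneg (r : List Int) (hpos : ∀ x ∈ r, 1 ≤ x) :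
    0 ≤ PySem.List.maxD r (fun y => y) 0 := by
  rcases hmx : PySem.List.max? r (fun y => y) with _ | m
  · simp [PySem.List.maxD, hmx]
  · have := hpos m (PySem.List.max?_mem hmx)
    simp only [PySem.List.maxD, hmx, Option.getD_some]
    omega

-- the common accept/skip step once A's scan has been reduced to B's table test
theorem pvStepBoth (b1 : List (List Char)) (b2 : PySem.Set (List Char)) (seq : List Char)
    (hb2 : ∀ x, PySem.Set.contains b2 x = b1.contains x) :
    pvRel (if !(b1.contains seq) then b1 ++ [seq] else b1)
          (if !(PySem.Set.contains b2 seq) then (b1 ++ [seq], PySem.Set.add b2 seq)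
           else (b1, b2)) := by
  rw [hb2]
  by_cases hmem : b1.contains seq
  · rw [hmem]
    exact ⟨rfl, hb2⟩
  · rw [Bool.not_eq_true] at hmem
    rw [hmem]
    simp only [Bool.not_false, if_true]
    refine ⟨rfl, fun x => ?_⟩
    have hnmem : seq ∉ b2 := by
      intro hx
      have h' : PySem.Set.contains b2 seq = true := by
        simp only [PySem.Set.contains_eq_listContains, List.contains_eq_mem, decide_eq_true_eq]
        exact hx
      rw [hb2] at h'
      rw [h'] at hmem
      cases hmem
    rw [PySem.Set.add_of_not_mem hnmem]
    have hx := hb2 x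
    simp only [PySem.Set.contains_eq_listContains, List.contains_eq_mem] at hx ⊢
    have hiff := decide_eq_decide.mp hx
    simp only [List.mem_append, hiff]

-- ===== VERDICT (by name: the statement is the Claim_ definition above) =====
theorem find_consecutive_patterns_py_spec : Claim_equal_find_consecutive_patterns_py := by
  intro digits min_length _ hpre
  obtain ⟨hml0, hcase⟩ := hpre
  unfold Spec_find_consecutive_patterns_py find_consecutive_patterns_py find_consecutive_patterns_py_alt
  dsimp only
  rw [pvRunO_fold]
  dsimp only
  rw [List.reverse_reverse]
  have hnm : (digits.length : Int) ≤
      ((PySem.Chars.join [] (digits.map fun d => (PySem.Int.toStr d).toList)).length : Int) := by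
    exact_mod_cast pvJoinLen digits
  rcases hcase with hd | hsmall | hbig
  · -- all digits nonnegative: B's ord-table is the int-chain run table
    rw [pvRunO_eq_pvRun _ (pvJoinDigits digits hd)]
    refine congrArg (List.map String.ofList)
      ((pvFoldRel _ _ pvRel _ ?_ [] ([], PySem.Set.empty) ⟨rfl, fun x => rfl⟩).1.symm)
    intro a b length hlen hab
    have hlen' := (PySem.List.mem_pyRange_one.mp hlen)
    have h0 : 0 ≤ length := le_trans hml0 hlen'.1
    by_cases hskip : PySem.List.maxD
        (pvRun (PySem.Chars.join [] (digits.map fun d => (PySem.Int.toStr d).toList)))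
        (fun x => x) 0 < length
    · -- B skips this length: no window of it can be consecutive, so A appends nothing either
      rw [if_pos hskip]
      have hone : 1 ≤ length := by
        have := pvMaxD_nonneg _ (pvRun_pos
          (PySem.Chars.join [] (digits.map fun d => (PySem.Int.toStr d).toList)))
        omega
      have hfix : ∀ (pat2 : List (List Char)) (start : Int),
          start ∈ PySem.List.pyRange 0 ((digits.length : Int) - length) 1 →
          (if ((List.range ((PySem.List.slice
                  (PySem.Chars.join [] (digits.map fun d => (PySem.Int.toStr d).toList))
                  (some start) (some (start + length))).length - 1)).all fun i =>
                pvIntChar ((PySem.List.slice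
                  (PySem.Chars.join [] (digits.map fun d => (PySem.Int.toStr d).toList))
                  (some start) (some (start + length))).getD i ' ') + 1 ==
                  pvIntChar ((PySem.List.slice
                    (PySem.Chars.join [] (digits.map fun d => (PySem.Int.toStr d).toList))
                    (some start) (some (start + length))).getD (i + 1) ' ')) &&
              !(pat2.contains (PySem.List.slice
                  (PySem.Chars.join [] (digits.map fun d => (PySem.Int.toStr d).toList))
                  (some start) (some (start + length))))
           then pat2 ++ [PySem.List.slice
                  (PySem.Chars.join [] (digits.map fun d => (PySem.Int.toStr d).toList))
                  (some start) (some (start + length))] else pat2) = pat2 := by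
        intro pat2 start hstart
        have hstart' := PySem.List.mem_pyRange_one.mp hstart
        have hs0 : 0 ≤ start := hstart'.1
        have hsl : start + length ≤
            ((PySem.Chars.join [] (digits.map fun d => (PySem.Int.toStr d).toList)).length : Int) := by
          have := hstart'.2
          omega
        rw [pvChainAll_eq _ length start hone hs0 hsl]
        have hgd : PySem.List.pyGetD
            (pvRun (PySem.Chars.join [] (digits.map fun d => (PySem.Int.toStr d).toList))) start 0
            ≤ PySem.List.maxD
              (pvRun (PySem.Chars.join [] (digits.map fun d => (PySem.Int.toStr d).toList)))
              (fun x => x) 0 := by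
          have hget : PySem.List.pyGetD
              (pvRun (PySem.Chars.join [] (digits.map fun d => (PySem.Int.toStr d).toList))) start 0
              = (pvRun (PySem.Chars.join [] (digits.map fun d => (PySem.Int.toStr d).toList))).getD
                  start.toNat 0 := by
            simp [PySem.List.pyGetD_of_nonneg, hs0]
          have hltn : start.toNat <
              (pvRun (PySem.Chars.join [] (digits.map fun d => (PySem.Int.toStr d).toList))).length := by
            rw [pvRun_length]
            have := hstart'.2
            omega
          rw [hget, List.getD_eq_getElem _ _ hltn]
          exact pvLe_maxD _ _ (List.getElem_mem hltn)
        rw [decide_eq_false (by omega), Bool.false_and]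
        simp
      rw [PySem.List.foldl_congr_mem _ _ (fun acc (_ : Int) => acc) a hfix, List.foldl_fixed]
      exact hab
    rw [if_neg hskip]
    refine pvFoldRel _ _ pvRel _ ?_ a b hab
    intro a' b' start hstart hab'
    obtain ⟨b1, b2⟩ := b'
    obtain ⟨hb1, hb2⟩ := hab'
    dsimp only at hb1
    subst hb1
    have hstart' := PySem.List.mem_pyRange_one.mp hstart
    have hs0 : 0 ≤ start := hstart'.1
    have hsl : start + length ≤
        ((PySem.Chars.join [] (digits.map fun d => (PySem.Int.toStr d).toList)).length : Int) := by
      have := hstart'.2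
      omega
    by_cases hone : 1 ≤ length
    · rw [pvChainAll_eq _ length start hone hs0 hsl]
      by_cases hge : length ≤ PySem.List.pyGetD
          (pvRun (PySem.Chars.join [] (digits.map fun d => (PySem.Int.toStr d).toList))) start 0
      · rw [decide_eq_true hge, Bool.true_and, if_pos hge]
        exact pvStepBoth b1 b2 _ hb2
      · rw [decide_eq_false (by exact hge), Bool.false_and, if_neg hge]
        simp only [Bool.false_eq_true, if_false]
        exact ⟨rfl, hb2⟩
    · -- length = 0: the window is empty on both sides
      rw [pvChainAll_small _ length start h0 (by omega) hs0 hsl, Bool.true_and]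
      have hg : length ≤ PySem.List.pyGetD
          (pvRun (PySem.Chars.join [] (digits.map fun d => (PySem.Int.toStr d).toList))) start 0 := by
        refine pvGuard_small _ start length (pvRun_pos _) hs0 ?_ (by omega)
        rw [pvRun_length]
        have := hstart'.2
        omega
      rw [if_pos hg]
      exact pvStepBoth b1 b2 _ hb2
  · -- at most two digits: every window has length 0 or 1, no comparison is ever made
    refine congrArg (List.map String.ofList)
      ((pvFoldRel _ _ pvRel _ ?_ [] ([], PySem.Set.empty) ⟨rfl, fun x => rfl⟩).1.symm)
    intro a b length hlen hab
    have hlen' := (PySem.List.mem_pyRange_one.mp hlen)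
    have h0 : 0 ≤ length := le_trans hml0 hlen'.1
    have h1 : length ≤ 1 := by
      have := hlen'.2
      omega
    have hnoskip : ¬ PySem.List.maxD
        (pvRunO (PySem.Chars.join [] (digits.map fun d => (PySem.Int.toStr d).toList)))
        (fun x => x) 0 < length := by
      have hmd0 := pvMaxD_nonneg _ (pvRunO_pos
        (PySem.Chars.join [] (digits.map fun d => (PySem.Int.toStr d).toList)))
      rcases (by omega : length = 0 ∨ length = 1) with rfl | rfl
      · omega
      · -- length = 1 < n, so the string (and the run table) is nonempty and every run is ≥ 1
        have hn2 : (2 : Int) ≤ (digits.length : Int) := by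
          have := hlen'.2
          omega
        have hlt : 0 < (pvRunO
            (PySem.Chars.join [] (digits.map fun d => (PySem.Int.toStr d).toList))).length := by
          rw [pvRunO_length]
          omega
        obtain ⟨y, t', hy⟩ : ∃ y t', pvRunO
            (PySem.Chars.join [] (digits.map fun d => (PySem.Int.toStr d).toList)) = y :: t' := by
          cases hz : pvRunO (PySem.Chars.join [] (digits.map fun d => (PySem.Int.toStr d).toList)) with
          | nil => rw [hz] at hlt; simp at hlt
          | cons y t' => exact ⟨y, t', rfl⟩
        have hy1 : 1 ≤ y := pvRunO_pos _ y (by rw [hy]; simp)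
        have hym := pvLe_maxD
          (pvRunO (PySem.Chars.join [] (digits.map fun d => (PySem.Int.toStr d).toList))) y
          (by rw [hy]; simp)
        omega
    rw [if_neg hnoskip]
    refine pvFoldRel _ _ pvRel _ ?_ a b hab
    intro a' b' start hstart hab'
    obtain ⟨b1, b2⟩ := b'
    obtain ⟨hb1, hb2⟩ := hab'
    dsimp only at hb1
    subst hb1
    have hstart' := PySem.List.mem_pyRange_one.mp hstart
    have hs0 : 0 ≤ start := hstart'.1
    have hsl : start + length ≤
        ((PySem.Chars.join [] (digits.map fun d => (PySem.Int.toStr d).toList)).length : Int) := by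
      have := hstart'.2
      omega
    rw [pvChainAll_small _ length start h0 h1 hs0 hsl, Bool.true_and]
    have hg : length ≤ PySem.List.pyGetD
        (pvRunO (PySem.Chars.join [] (digits.map fun d => (PySem.Int.toStr d).toList))) start 0 := by
      refine pvGuard_small _ start length (pvRunO_pos _) hs0 ?_ h1
      rw [pvRunO_length]
      have := hstart'.2
      omega
    rw [if_pos hg]
    exact pvStepBoth b1 b2 _ hb2
  · -- min_length ≥ len(digits): the outer range is empty in both programs
    rw [PySem.List.pyRange_one_eq_nil hbig, List.foldl_nil, List.foldl_nil]
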